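-- pv_equiv track=rewrite | github.com/itlab-vision/dl-benchmark | src/inference/utils.py | parse_value_per_device
-- ===== SOURCE A (Python) =====
-- def parse_value_per_device(device_list, values):
--     result = dict.fromkeys(device_list, None)
--     if values is None:
--         return result
--     if values.isdecimal():
--         new_result = result
--         for key in result:
--             new_result[key] = values
--         return result
--     for pair in values.split(','):
--         key, value = pair.split(':')
--         if key in device_list:
--             result[key] = value
--     return result
-- ===== SOURCE B (Python) =====
-- def parse_value_per_device(device_list, values):
--     if values is not None and not values.isdecimal():
--         pairs = [pair.split(':') for pair in values.split(',')]
--         pairs.reverse()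
--     result = {}
--     for dev in device_list:
--         if values is None:
--             result[dev] = None
--         elif values.isdecimal():
--             result[dev] = values
--         else:
--             result[dev] = next((v for k, v in pairs if k == dev), None)
--     return result
-- ===== Notes on version B (the rewrite author's own statement) =====
-- stated objective: alternative
-- what changed: B inverts the traversal: instead of A's loop over pairs conditionally mutating a preset dict (last write wins), B loops over the devices and, for each device, searches the reversed parsed pair list for the first matching key (equivalent to last-wins), building the result dict directly with no pre-initialisation.
import Mathlib
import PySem

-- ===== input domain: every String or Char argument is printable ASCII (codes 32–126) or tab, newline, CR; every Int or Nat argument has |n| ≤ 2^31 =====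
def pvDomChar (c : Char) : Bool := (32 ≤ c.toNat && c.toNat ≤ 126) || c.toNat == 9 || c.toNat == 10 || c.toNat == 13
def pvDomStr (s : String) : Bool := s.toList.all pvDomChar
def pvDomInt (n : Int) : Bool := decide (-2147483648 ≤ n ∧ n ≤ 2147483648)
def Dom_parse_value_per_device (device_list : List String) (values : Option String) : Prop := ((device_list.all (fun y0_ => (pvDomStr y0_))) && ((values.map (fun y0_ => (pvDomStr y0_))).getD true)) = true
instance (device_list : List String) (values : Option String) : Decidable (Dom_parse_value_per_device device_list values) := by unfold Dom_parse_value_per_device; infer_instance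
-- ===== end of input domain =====

-- B inverts the traversal: A loops over the parsed pairs mutating a preset dict (last write wins);
-- B loops over the devices and searches the reversed parsed pair list for the first matching key,
-- building the result dict directly (objective: alternative; return-value equivalence, neither mutates its arguments).
-- Python's str.isdecimal agrees with PySem.Str.strIsdigit on the ASCII domain Dom_ admits.

-- ===== PORT A =====
def parse_value_per_device (device_list : List String) (values : Option String) : List (String × Option String) :=
  let result := device_list.foldl (fun d k => d.insert k (none : Option String)) PySem.Dict.empty
  match values with
  | none => result.items
  | some v =>
    if PySem.Str.strIsdigit v = true then
      (result.keys.foldl (fun d key => d.insert key (some v)) result).items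
    else
      (((PySem.Str.split? v ",").getD []).foldl (fun d pair =>
          match (PySem.Str.split? pair ":").getD [] with
          | [key, value] => if key ∈ device_list then d.insert key (some value) else d
          | _ => d)   -- a pair without exactly one ':' raises ValueError in Python; Pre_ excludes it
        result).items

-- ===== PORT B =====
def parse_value_per_device_alt (device_list : List String) (values : Option String) : List (String × Option String) :=
  let pairs : List (List String) :=
    match values with
    | none => []
    | some v =>
      if PySem.Str.strIsdigit v = true then []
      else (((PySem.Str.split? v ",").getD []).map (fun p => (PySem.Str.split? p ":").getD [])).reverse
  (device_list.foldl (fun d dev =>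
      d.insert dev (
        match values with
        | none => (none : Option String)
        | some v =>
          if PySem.Str.strIsdigit v = true then some v
          else
            -- next((v for k, v in pairs if k == dev), None); Pre_ makes every kv a [key, value] pair
            match pairs.find? (fun kv => kv.getD 0 "" == dev) with
            | some kv => some (kv.getD 1 "")
            | none => none)) PySem.Dict.empty).items

-- ===== PRECONDITION & SPEC =====
-- Pre_ excludes exactly the inputs where Python A raises ValueError: a non-decimal values string
-- containing a comma-separated piece that does not split at ':' into exactly two parts.
def Pre_parse_value_per_device (device_list : List String) (values : Option String) : Prop :=
  ∀ v ∈ values.toList, PySem.Str.strIsdigit v = true ∨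
    ∀ p ∈ (PySem.Str.split? v ",").getD [], ((PySem.Str.split? p ":").getD []).length = 2
instance (device_list : List String) (values : Option String) : Decidable (Pre_parse_value_per_device device_list values) := by unfold Pre_parse_value_per_device; infer_instance

def pvWitness_parse_value_per_device : List String × Option String := (["CPU", "GPU", "NPU"], some "CPU:3,MYRIAD:2,GPU:4")

def Spec_parse_value_per_device (device_list : List String) (values : Option String) (out : List (String × Option String)) : Prop := out = parse_value_per_device_alt device_list values
instance (device_list : List String) (values : Option String) (out : List (String × Option String)) : Decidable (Spec_parse_value_per_device device_list values out) := by unfold Spec_parse_value_per_device; infer_instance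

-- ===== CLAIM (what is proved, stated in full; the proofs are below) =====
def Claim_equal_parse_value_per_device : Prop := ∀ (device_list : List String) (values : Option String), Dom_parse_value_per_device device_list values → Pre_parse_value_per_device device_list values → Spec_parse_value_per_device device_list values (parse_value_per_device device_list values)

-- ===== LEMMAS AND PROOFS =====

-- value function accumulated by A's pair loop, used to characterise A's dict shape
def updF (dl : List String) (f : String → Option String) (pair : String) : String → Option String :=
  match (PySem.Str.split? pair ":").getD [] with
  | [k, v] => if k ∈ dl then (fun j => if j = k then some v else f j) else f
  | _ => f

lemma mk_contains_of_mem {L : List String} (f : String → Option String) {k : String} (hk : k ∈ L) :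
    (PySem.Dict.mk (L.map fun j => (j, f j))).contains k = true := by
  unfold PySem.Dict.contains
  simp only [List.any_map, List.any_eq_true, Function.comp]
  exact ⟨k, hk, by simp⟩

lemma mk_insert_mem {L : List String} (f : String → Option String) {k : String} (v : Option String) (hk : k ∈ L) :
    (PySem.Dict.mk (L.map fun j => (j, f j))).insert k v
      = PySem.Dict.mk (L.map fun j => (j, if j = k then v else f j)) := by
  apply PySem.Dict.ext
  rw [PySem.Dict.items_insert_of_contains _ _ (mk_contains_of_mem f hk)]
  simp only [List.map_map]
  refine List.map_congr_left (fun j _ => ?_)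
  by_cases h : j = k <;> simp [h, Function.comp]

lemma mk_insert_not_mem {L : List String} (f : String → Option String) {k : String} (v : Option String) (hk : k ∉ L) :
    (PySem.Dict.mk (L.map fun j => (j, f j))).insert k v
      = PySem.Dict.mk ((L ++ [k]).map fun j => (j, if j = k then v else f j)) := by
  apply PySem.Dict.ext
  have hc : (PySem.Dict.mk (L.map fun j => (j, f j))).contains k = false := by
    simp [PySem.Dict.contains]
    intro j hj
    exact fun h => (hk (h ▸ hj)).elim
  rw [PySem.Dict.items_insert_of_not_contains _ _ hc]
  simp only [List.map_append, List.map_cons, List.map_nil]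
  congr 1
  exact (List.map_congr_left (fun j hj => by
    have : j ≠ k := fun h => hk (h ▸ hj)
    simp [this])).symm

lemma foldl_insert_shape (l : List String) (f : String → Option String) (L : List String) :
    l.foldl (fun d k => d.insert k (f k)) (PySem.Dict.mk (L.map fun j => (j, f j)))
      = PySem.Dict.mk ((PySem.Set.update L l).map fun j => (j, f j)) := by
  induction l generalizing L with
  | nil => rfl
  | cons x xs ih =>
    simp only [List.foldl_cons]
    by_cases hx : x ∈ L
    · rw [mk_insert_mem f (f x) hx]
      have hvals : (L.map fun j => (j, if j = x then f x else f j)) = L.map fun j => (j, f j) := by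
        refine List.map_congr_left (fun j _ => ?_)
        by_cases h : j = x <;> simp [h]
      rw [hvals]
      have hupd : PySem.Set.update L (x :: xs) = PySem.Set.update L xs := by
        simp [PySem.Set.update, PySem.Set.add, List.contains_eq_mem, hx]
      rw [hupd]
      exact ih L
    · rw [mk_insert_not_mem f (f x) hx]
      have hvals : ((L ++ [x]).map fun j => (j, if j = x then f x else f j))
          = (L ++ [x]).map fun j => (j, f j) := by
        refine List.map_congr_left (fun j _ => ?_)
        by_cases h : j = x <;> simp [h]
      rw [hvals]
      have hupd : PySem.Set.update L (x :: xs) = PySem.Set.update (L ++ [x]) xs := by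
        simp [PySem.Set.update, PySem.Set.add, List.contains_eq_mem, hx]
      rw [hupd]
      exact ih (L ++ [x])

lemma foldl_const_insert (K : List String) (v : String) :
    ∀ (L : List String) (f : String → Option String), (∀ k ∈ K, k ∈ L) →
    K.foldl (fun d k => d.insert k (some v)) (PySem.Dict.mk (L.map fun j => (j, f j)))
      = PySem.Dict.mk (L.map fun j => (j, if j ∈ K then some v else f j)) := by
  induction K with
  | nil => intro L f _; simp
  | cons k K' ih =>
    intro L f hK
    simp only [List.foldl_cons]
    rw [mk_insert_mem f (some v) (hK k (List.mem_cons_self))]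
    rw [ih L _ (fun j hj => hK j (List.mem_cons_of_mem _ hj))]
    refine congrArg _ (List.map_congr_left (fun j _ => ?_))
    by_cases h1 : j ∈ K' <;> by_cases h2 : j = k <;> simp [h1, h2]

lemma foldl_stepA_shape (P : List String) (dl : List String) :
    ∀ f : String → Option String,
    P.foldl (fun d pair =>
        match (PySem.Str.split? pair ":").getD [] with
        | [key, value] => if key ∈ dl then d.insert key (some value) else d
        | _ => d)
      (PySem.Dict.mk ((PySem.Set.ofList dl).map fun j => (j, f j)))
      = PySem.Dict.mk ((PySem.Set.ofList dl).map fun j => (j, P.foldl (updF dl) f j)) := by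
  induction P with
  | nil => intro f; rfl
  | cons p P' ih =>
    intro f
    simp only [List.foldl_cons]
    have hupd : updF dl f p = match (PySem.Str.split? p ":").getD [] with
        | [k, v] => if k ∈ dl then (fun j => if j = k then some v else f j) else f
        | _ => f := rfl
    rcases hsp : (PySem.Str.split? p ":").getD [] with _ | ⟨k, _ | ⟨v, _ | _⟩⟩ <;>
      simp only [hupd, hsp] <;> try exact ih f
    by_cases hk : k ∈ dl
    · simp only [if_pos hk]
      rw [mk_insert_mem f (some v) ((PySem.Set.mem_ofList dl k).mpr hk)]
      exact ih _
    · simp only [if_neg hk]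
      exact ih f

-- A's last-wins accumulation over the pairs equals B's first-match search over the reversed pair list
lemma foldl_updF_eq_find (P : List String) (dl : List String)
    (hP : ∀ p ∈ P, ((PySem.Str.split? p ":").getD []).length = 2) :
    ∀ (f : String → Option String) (j : String), j ∈ dl →
    P.foldl (updF dl) f j
      = match ((P.map (fun p => (PySem.Str.split? p ":").getD [])).reverse).find?
            (fun kv => kv.getD 0 "" == j) with
        | some kv => some (kv.getD 1 "")
        | none => f j := by
  induction P with
  | nil => intro f j _; rfl
  | cons p P' ih =>
    intro f j hj
    have hp2 := hP p (List.mem_cons_self)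
    rcases hsp : (PySem.Str.split? p ":").getD [] with _ | ⟨k, _ | ⟨v, _ | _⟩⟩ <;>
      rw [hsp] at hp2 <;> simp at hp2
    have hP' : ∀ q ∈ P', ((PySem.Str.split? q ":").getD []).length = 2 :=
      fun q hq => hP q (List.mem_cons_of_mem _ hq)
    simp only [List.foldl_cons, List.map_cons, List.reverse_cons, List.find?_append]
    rw [ih hP' (updF dl f p) j hj]
    cases hfind : ((P'.map (fun q => (PySem.Str.split? q ":").getD [])).reverse).find?
        (fun kv => kv.getD 0 "" == j) with
    | some kv => simp
    | none =>
      unfold updF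
      rw [hsp]
      simp only [List.find?_cons, List.find?_nil, List.getD_cons_zero]
      by_cases hjk : k = j
      · subst hjk
        simp [hj]
      · have hbe : (k == j) = false := by simp [hjk]
        have hne : j ≠ k := fun h => hjk h.symm
        by_cases hk : k ∈ dl <;> simp [hk, hbe, hne]

lemma empty_eq_mk_nil (f : String → Option String) :
    (PySem.Dict.empty : PySem.Dict String (Option String))
      = PySem.Dict.mk (([] : List String).map fun j => (j, f j)) := rfl

-- ===== VERDICT (by name: the statement is the Claim_ definition above) =====
theorem parse_value_per_device_spec : Claim_equal_parse_value_per_device := by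
  intro dl values _hDom hPre
  unfold Spec_parse_value_per_device parse_value_per_device parse_value_per_device_alt
  have hshape : ∀ f : String → Option String,
      dl.foldl (fun d k => d.insert k (f k)) PySem.Dict.empty
        = PySem.Dict.mk ((PySem.Set.ofList dl).map fun j => (j, f j)) := fun f => by
    rw [empty_eq_mk_nil f, foldl_insert_shape]; rfl
  cases values with
  | none => simp [hshape (fun _ => (none : Option String))]
  | some v =>
    by_cases hd : PySem.Str.strIsdigit v = true
    · simp only [hd, if_pos]
      rw [hshape (fun _ => (none : Option String)), hshape (fun _ => some v)]
      have hkeys : (PySem.Dict.mk ((PySem.Set.ofList dl).map fun j => (j, (none : Option String)))).keys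
          = PySem.Set.ofList dl := by
        simp [PySem.Dict.keys_mk, Function.comp_def]
      rw [hkeys, foldl_const_insert _ v _ _ (fun k hk => hk)]
      refine congrArg _ (congrArg _ (List.map_congr_left (fun j hj => ?_)))
      simp [hj]
    · have hP : ∀ p ∈ (PySem.Str.split? v ",").getD [],
          ((PySem.Str.split? p ":").getD []).length = 2 := by
        rcases hPre v (by simp) with h | h
        · exact absurd h hd
        · exact h
      simp only [hd, if_false, Bool.false_eq_true]
      rw [hshape (fun _ => (none : Option String)), foldl_stepA_shape,
        hshape (fun dev =>
          match (((((PySem.Str.split? v ",").getD []).map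
              (fun p => (PySem.Str.split? p ":").getD [])).reverse).find?
              (fun kv => kv.getD 0 "" == dev)) with
          | some kv => some (kv.getD 1 "")
          | none => (none : Option String))]
      refine congrArg _ (congrArg _ (List.map_congr_left (fun j hj => ?_)))
      have hj' : j ∈ dl := (PySem.Set.mem_ofList dl j).mp hj
      simp only [Prod.mk.injEq, true_and]
      exact foldl_updF_eq_find _ dl hP (fun _ => none) j hj'
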